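-- pv_equiv track=rewrite | github.com/austral-prog/tp-6-loops-miamisson | enumerate_list.py | enumerate_backwards
-- ===== SOURCE A (Python) =====
-- def enumerate_backwards(lst):
--     """
--     Igual que enumerate_list, pero cada palabra debe estar escrita al reves.
--     Los strings vacios se deben saltear.
--
--     Ejemplo: enumerate_backwards(["Red", "Green", ""]) -> ["0. deR", "1. neerG"]
--     """
--     nueva_lista1 = []
--     indice = 0
--     for i in range(0, len(lst)):
--         if lst[i] != "":
--             palabra = lst[i][::-1]
--             nueva_lista1.append(f"{indice}. {palabra}")
--             indice = indice + 1
--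
--     return nueva_lista1
-- ===== SOURCE B (Python) =====
-- def enumerate_backwards(lst):
--     # Staged, back-to-front construction: first count the non-empty words,
--     # then walk the list backwards with a countdown index, building the
--     # output in reverse and flipping it once at the end.
--     k = sum(1 for x in lst if x != "")
--     out = []
--     for w in reversed(lst):
--         if w != "":
--             k -= 1
--             out.append(f"{k}. {w[::-1]}")
--     out.reverse()
--     return out
-- ===== Notes on version B (the rewrite author's own statement) =====
-- stated objective: alternative
-- what changed: Replaces A's single forward pass with an incrementing counter by two staged passes: count the non-empty words first, then traverse the list back-to-front with a countdown index, building the output in reverse and flipping it at the end.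
import Mathlib
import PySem

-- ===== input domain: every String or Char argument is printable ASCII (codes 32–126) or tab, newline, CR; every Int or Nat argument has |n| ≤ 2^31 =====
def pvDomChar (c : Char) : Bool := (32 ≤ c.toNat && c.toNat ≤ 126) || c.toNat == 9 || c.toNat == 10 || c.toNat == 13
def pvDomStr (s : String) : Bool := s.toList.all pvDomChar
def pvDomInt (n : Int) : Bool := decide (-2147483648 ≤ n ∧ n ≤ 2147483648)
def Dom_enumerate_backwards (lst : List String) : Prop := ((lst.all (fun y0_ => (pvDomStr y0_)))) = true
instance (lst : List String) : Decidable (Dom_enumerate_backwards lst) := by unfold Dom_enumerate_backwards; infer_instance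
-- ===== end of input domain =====

-- B replaces A's single forward pass with an incrementing counter by two staged passes:
-- count the non-empty words, then build the output back-to-front with a countdown index (alternative).

-- ===== PORT A =====
-- for-loop over range(0, len(lst)) with state (nueva_lista1, indice); lst[i][::-1] is reverse
def enumerate_backwards (lst : List String) : List String :=
  (((PySem.List.pyRange 0 (PySem.List.len lst) 1).foldl
    (fun (st : List String × Int) i =>
      let w := PySem.List.pyGetD lst i ""
      if w ≠ "" then
        let palabra := String.ofList w.toList.reverse
        (st.1 ++ [PySem.Int.toStr st.2 ++ ". " ++ palabra], st.2 + 1)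
      else st)
    ([], 0))).1

-- ===== PORT B =====
-- k = sum(1 for x in lst if x != ""); then for w in reversed(lst): decrement k and
-- append the label; finally out.reverse().
def enumerate_backwards_alt (lst : List String) : List String :=
  let k0 : Int := lst.foldl (fun c x => if x ≠ "" then c + 1 else c) 0
  let st := lst.reverse.foldl
      (fun (st : List String × Int) w =>
        if w ≠ "" then
          (st.1 ++ [PySem.Int.toStr (st.2 - 1) ++ ". " ++ String.ofList w.toList.reverse], st.2 - 1)
        else st)
      ([], k0)
  st.1.reverse

-- ===== PRECONDITION & SPEC =====
def Spec_enumerate_backwards (lst : List String) (out : List String) : Prop := out = enumerate_backwards_alt lst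
instance (lst : List String) (out : List String) : Decidable (Spec_enumerate_backwards lst out) := by unfold Spec_enumerate_backwards; infer_instance

-- ===== CLAIM (what is proved, stated in full; the proofs are below) =====
def Claim_equal_enumerate_backwards : Prop := ∀ (lst : List String), Dom_enumerate_backwards lst → Spec_enumerate_backwards lst (enumerate_backwards lst)

-- ===== LEMMAS AND PROOFS =====

-- the label for word w at index n
def pvLabel (n : Int) (w : String) : String :=
  PySem.Int.toStr n ++ ". " ++ String.ofList w.toList.reverse

-- A's loop body, as a plain fold over the list of words
def pvStepA (st : List String × Int) (w : String) : List String × Int :=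
  if w ≠ "" then (st.1 ++ [pvLabel st.2 w], st.2 + 1) else st

-- B's loop body
def pvStepB (st : List String × Int) (w : String) : List String × Int :=
  if w ≠ "" then (st.1 ++ [pvLabel (st.2 - 1) w], st.2 - 1) else st

-- the common value: labels of the non-empty words of lst, indices from n upward
def pvLabels : List String → Int → List String
  | [], _ => []
  | w :: rest, n => if w ≠ "" then pvLabel n w :: pvLabels rest (n + 1) else pvLabels rest n

theorem foldA_eq_labels (lst : List String) (acc : List String) (n : Int) :
    (lst.foldl pvStepA (acc, n)).1 = acc ++ pvLabels lst n := by
  induction lst generalizing acc n with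
  | nil => simp [pvLabels]
  | cons w rest ih =>
    by_cases hw : w = "" <;> simp [pvStepA, pvLabels, hw, ih]

theorem count_fold (lst : List String) (c0 : Int) :
    lst.foldl (fun c x => if x ≠ "" then c + 1 else c) c0
      = c0 + ((lst.filter (fun x => x ≠ "")).length : Int) := by
  induction lst generalizing c0 with
  | nil => simp
  | cons w rest ih =>
    by_cases hw : w = ""
    · simp only [List.foldl_cons, List.filter_cons, hw]
      simpa using ih c0
    · simp only [List.foldl_cons, List.filter_cons, if_pos hw]
      rw [ih]
      simp only [hw, ne_eq, not_false_iff, decide_true, if_pos, List.length_cons]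
      push_cast
      ring

theorem foldB_eq_labels (lst : List String) (acc : List String) (k : Int) :
    lst.reverse.foldl pvStepB (acc, k)
      = (acc ++ (pvLabels lst (k - ((lst.filter (fun x => x ≠ "")).length : Int))).reverse,
         k - ((lst.filter (fun x => x ≠ "")).length : Int)) := by
  induction lst generalizing acc k with
  | nil => simp [pvLabels]
  | cons w rest ih =>
    rw [List.reverse_cons, List.foldl_append]
    rw [ih]
    by_cases hw : w = ""
    · simp [pvStepB, pvLabels, hw]
    · have h1 : k - (((w :: rest).filter (fun x => x ≠ "")).length : Int)
          = k - ((rest.filter (fun x => x ≠ "")).length : Int) - 1 := by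
        simp [hw]; ring
      simp only [pvLabels, hw, ne_eq, not_false_iff, if_true, h1, List.reverse_cons]
      simp [pvStepB, hw, pvLabel, List.append_assoc]

-- ===== VERDICT (by name: the statement is the Claim_ definition above) =====
theorem enumerate_backwards_spec : Claim_equal_enumerate_backwards := by
  intro lst _
  unfold Spec_enumerate_backwards enumerate_backwards enumerate_backwards_alt
  simp only [PySem.List.len_eq]
  rw [PySem.List.foldl_pyRange_zero_pyGetD'
        (f := fun (st : List String × Int) w =>
          if w ≠ "" then
            (st.1 ++ [PySem.Int.toStr st.2 ++ ". " ++ String.ofList w.toList.reverse], st.2 + 1)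
          else st)
        (xs := lst) (d := "") (init := (([], 0) : List String × Int))]
  have hA : (lst.foldl pvStepA ([], 0)).1 = pvLabels lst 0 := by
    simpa using foldA_eq_labels lst [] 0
  have hB := foldB_eq_labels lst [] ((lst.filter (fun x => x ≠ "")).length : Int)
  simp only [sub_self] at hB
  show (lst.foldl pvStepA ([], 0)).1 = _
  rw [hA, count_fold]
  simp only [zero_add]
  show pvLabels lst 0
      = (lst.reverse.foldl pvStepB ([], ((lst.filter (fun x => x ≠ "")).length : Int))).1.reverse
  rw [hB]
  simp
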